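-- pv_equiv track=rewrite | github.com/deysumitkr/Learning-from-Demonstration-in-Relational-Domains | scripts/learners/behavioralCloning/aceFiles2.py | genKB
-- ===== SOURCE A (Python) =====
-- def genKB(states):
-- 	kb = ''
-- 	count = 1
-- 	for state in states:
-- 		s = '.\n'.join(state[0])+'.\n'
-- 		for act in state[1].keys():
-- 			eg = s + act+'.\n' + state[1][act][0]+'.\n'
-- 			for loop in range(state[1][act][1]):
-- 				egf = 'begin(model(example'+str(count)+')).\n' + eg + 'end(model(example'+str(count)+')).\n\n'
-- 				count+=1
-- 				kb += egf
-- 	return kb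
-- ===== SOURCE B (Python) =====
-- def genKB(states):
--     bodies = []
--     for state in states:
--         s = '.\n'.join(state[0]) + '.\n'
--         for act, (pre, n) in state[1].items():
--             bodies += [s + act + '.\n' + pre + '.\n'] * n
--     out = []
--     for i, body in enumerate(bodies, 1):
--         out.append('begin(model(example' + str(i) + ')).\n'
--                    + body + 'end(model(example' + str(i) + ')).\n\n')
--     return ''.join(out)
-- ===== Notes on version B (the rewrite author's own statement) =====
-- stated objective: alternative
-- what changed: B splits A's single triple-nested loop with a running counter into two passes: first build the flat list of example bodies (with list-repetition instead of an inner range loop), then number and wrap them by enumerating that list from 1 and joining.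
import Mathlib
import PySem

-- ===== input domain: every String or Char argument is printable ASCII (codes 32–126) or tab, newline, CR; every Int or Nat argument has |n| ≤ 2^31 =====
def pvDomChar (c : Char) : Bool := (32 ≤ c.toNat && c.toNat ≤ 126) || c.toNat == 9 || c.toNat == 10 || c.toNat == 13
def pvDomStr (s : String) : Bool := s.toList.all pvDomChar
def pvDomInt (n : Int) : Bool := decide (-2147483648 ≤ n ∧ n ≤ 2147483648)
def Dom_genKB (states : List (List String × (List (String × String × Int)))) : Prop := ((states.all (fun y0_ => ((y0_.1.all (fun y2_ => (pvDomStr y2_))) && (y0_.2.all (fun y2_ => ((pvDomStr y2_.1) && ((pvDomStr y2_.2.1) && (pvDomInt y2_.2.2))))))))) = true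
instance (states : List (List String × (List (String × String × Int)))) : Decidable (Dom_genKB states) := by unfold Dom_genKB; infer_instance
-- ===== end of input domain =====

-- B replaces A's single triple-nested loop with a running counter by two passes: build the flat
-- list of example bodies first, then number and wrap them by enumerating that list from 1 (alternative decomposition).

-- ===== PORT A =====
-- literal transliteration of A: one fold over states carrying (kb, count); dict keys iterated, value looked up by key
def genKB (states : List (List String × (List (String × String × Int)))) : String :=
  (states.foldl (fun (acc : String × Int) state =>
    let d := PySem.Dict.ofList state.2
    let s := PySem.Str.join ".\n" state.1 ++ ".\n"
    d.keys.foldl (fun acc act =>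
      let eg := s ++ act ++ ".\n" ++ (d.getD act ("", 0)).1 ++ ".\n"
      (PySem.List.pyRange 0 (d.getD act ("", 0)).2 1).foldl (fun acc _ =>
        (acc.1 ++ ("begin(model(example" ++ PySem.Int.toStr acc.2 ++ ")).\n" ++ eg ++
                   "end(model(example" ++ PySem.Int.toStr acc.2 ++ ")).\n\n"),
         acc.2 + 1)) acc) acc) ("", 1)).1

-- ===== PORT B =====
-- literal transliteration of B: pass 1 accumulates the bodies list ('bodies += [..]*n'),
-- pass 2 enumerates from 1, wraps, and joins
def genKB_alt (states : List (List String × (List (String × String × Int)))) : String :=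
  let bodies := states.foldl (fun (bs : List String) state =>
    let s := PySem.Str.join ".\n" state.1 ++ ".\n"
    (PySem.Dict.ofList state.2).items.foldl (fun bs p =>
      bs ++ PySem.List.pyRepeat [s ++ p.1 ++ ".\n" ++ p.2.1 ++ ".\n"] p.2.2) bs) []
  PySem.Str.join "" ((PySem.List.enumerate bodies 1).map (fun p =>
    "begin(model(example" ++ PySem.Int.toStr p.1 ++ ")).\n" ++ p.2 ++
    "end(model(example" ++ PySem.Int.toStr p.1 ++ ")).\n\n"))

-- ===== PRECONDITION & SPEC =====
def Spec_genKB (states : List (List String × (List (String × String × Int)))) (out : String) : Prop := out = genKB_alt states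
instance (states : List (List String × (List (String × String × Int)))) (out : String) : Decidable (Spec_genKB states out) := by unfold Spec_genKB; infer_instance

-- ===== CLAIM (what is proved, stated in full; the proofs are below) =====
def Claim_equal_genKB : Prop := ∀ (states : List (List String × (List (String × String × Int)))), Dom_genKB states → Spec_genKB states (genKB states)

-- ===== LEMMAS AND PROOFS =====

-- the numbered wrapper and the counting step shared by the reasoning below
def pvWrap (i : Int) (b : String) : String :=
  "begin(model(example" ++ PySem.Int.toStr i ++ ")).\n" ++ b ++
  "end(model(example" ++ PySem.Int.toStr i ++ ")).\n\n"

def pvStep (a : String × Int) (b : String) : String × Int := (a.1 ++ pvWrap a.2 b, a.2 + 1)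

theorem pvJoin_empty_cons (x : String) (xs : List String) :
    PySem.Str.join "" (x :: xs) = x ++ PySem.Str.join "" xs := by
  rw [← String.toList_inj]
  simp [PySem.Str.join, PySem.Chars.join, List.intercalate]
  cases xs with
  | nil => simp
  | cons y ys => simp

-- a fold that ignores its elements only depends on the list length
theorem pvFoldl_const {α β : Type} (g : β → β) :
    ∀ (l : List α) (acc : β), l.foldl (fun a _ => g a) acc = g^[l.length] acc := by
  intro l
  induction l with
  | nil => intro acc; simp
  | cons x xs ih => intro acc; simp [List.foldl_cons, ih, Function.iterate_succ_apply]

-- A's inner 'for loop in range(n)' is a pvStep-fold over the replicated body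
theorem pvInner (n : Int) (b : String) (acc : String × Int) :
    (PySem.List.pyRange 0 n 1).foldl (fun a _ => pvStep a b) acc
      = (PySem.List.pyRepeat [b] n).foldl pvStep acc := by
  rw [PySem.List.pyRepeat_singleton]
  have h1 := pvFoldl_const (fun a => pvStep a b) (PySem.List.pyRange 0 n 1) acc
  have h2 := pvFoldl_const (fun a => pvStep a b) (List.replicate n.toNat b) acc
  have hlen : (PySem.List.pyRange 0 n 1).length = n.toNat := by
    simp [PySem.List.pyRange]; omega
  have h3 : (List.replicate n.toNat b).foldl (fun a _ => pvStep a b) acc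
      = (List.replicate n.toNat b).foldl pvStep acc := by
    clear h1 h2 hlen
    induction n.toNat generalizing acc with
    | zero => simp
    | succ m ih => simp [List.replicate_succ, List.foldl_cons, ih]
  simp only [List.length_replicate] at h2
  rw [h1, hlen, ← h2, h3]

-- folding pvStep over a flatMap = folding the per-element folds
theorem pvFoldl_flat {α : Type} (f : α → List String) :
    ∀ (l : List α) (acc : String × Int),
      l.foldl (fun a x => (f x).foldl pvStep a) acc = (l.flatMap f).foldl pvStep acc := by
  intro l
  induction l with
  | nil => intro acc; simp
  | cons x xs ih => intro acc; simp [List.foldl_cons, List.flatMap_cons, List.foldl_append, ih]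

-- numbering by a running counter = numbering by position (enumerate from the start counter)
theorem pvNum : ∀ (bs : List String) (s : String) (c : Int),
    (bs.foldl pvStep (s, c)).1
      = s ++ PySem.Str.join "" ((PySem.List.enumerate bs c).map (fun p => pvWrap p.1 p.2)) := by
  intro bs
  induction bs with
  | nil =>
      intro s c
      rw [← String.toList_inj]
      simp [PySem.List.enumerate, PySem.Str.join, PySem.Chars.join, List.intercalate]
  | cons b bs ih =>
      intro s c
      rw [List.foldl_cons, PySem.List.enumerate_cons, List.map_cons, pvJoin_empty_cons]
      show ((bs.foldl pvStep (s ++ pvWrap c b, c + 1))).1 = _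
      rw [ih, String.append_assoc]

-- A's per-state loop = pvStep-fold over that state's bodies
theorem pvState (ps : List (String × String × Int)) (s : String) (acc : String × Int) :
    (PySem.Dict.ofList ps).keys.foldl (fun acc act =>
      (PySem.List.pyRange 0 ((PySem.Dict.ofList ps).getD act ("", 0)).2 1).foldl (fun acc _ =>
        (acc.1 ++ pvWrap acc.2 (s ++ act ++ ".\n" ++ ((PySem.Dict.ofList ps).getD act ("", 0)).1 ++ ".\n"),
         acc.2 + 1)) acc) acc
    = ((PySem.Dict.ofList ps).items.flatMap (fun p =>
        PySem.List.pyRepeat [s ++ p.1 ++ ".\n" ++ p.2.1 ++ ".\n"] p.2.2)).foldl pvStep acc := by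
  rw [← pvFoldl_flat]
  rw [PySem.Dict.items_eq_map_keys _ (PySem.Dict.nodup_keys_ofList ps) ("", 0), List.foldl_map]
  refine PySem.List.foldl_congr_mem _ _ _ _ (fun a k _ => ?_)
  have := pvInner ((PySem.Dict.ofList ps).getD k ("", 0)).2
    (s ++ k ++ ".\n" ++ ((PySem.Dict.ofList ps).getD k ("", 0)).1 ++ ".\n") a
  simpa [pvStep] using this

-- the flat list of example bodies, in order
def pvBodies (states : List (List String × (List (String × String × Int)))) : List String :=
  states.flatMap (fun st =>
    (PySem.Dict.ofList st.2).items.flatMap (fun p =>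
      PySem.List.pyRepeat [(PySem.Str.join ".\n" st.1 ++ ".\n") ++ p.1 ++ ".\n" ++ p.2.1 ++ ".\n"] p.2.2))

theorem genKB_eq (states : List (List String × (List (String × String × Int)))) :
    genKB states = ((pvBodies states).foldl pvStep ("", 1)).1 := by
  unfold genKB pvBodies
  rw [← pvFoldl_flat]
  congr 1
  refine PySem.List.foldl_congr_mem _ _ _ _ (fun a st _ => ?_)
  simpa [pvWrap] using pvState st.2 (PySem.Str.join ".\n" st.1 ++ ".\n") a

theorem genKB_alt_eq (states : List (List String × (List (String × String × Int)))) :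
    genKB_alt states
      = PySem.Str.join "" ((PySem.List.enumerate (pvBodies states) 1).map (fun p => pvWrap p.1 p.2)) := by
  unfold genKB_alt pvBodies
  simp only [PySem.List.foldl_append_eq_flatMap, List.nil_append, pvWrap]

-- ===== VERDICT (by name: the statement is the Claim_ definition above) =====
theorem genKB_spec : Claim_equal_genKB := by
  intro states _
  unfold Spec_genKB
  rw [genKB_eq, genKB_alt_eq, pvNum]
  rw [← String.toList_inj]
  simp
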